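-- pv_equiv track=rewrite | github.com/Junbro0708/Algorithm | 258_Server/258_Server.py | solution
-- ===== SOURCE A (Python) =====
-- def solution(players, m, k):
--     answer = 0
--     server = []
--
--     for player in players:
--         server = [val - 1 for val in server]
--         server = [val for val in server if val > 0]
--
--         available_players = len(server) * m + m - 1
--         if player > available_players:
--             temp = available_players
--             while temp < player:
--                 temp += m
--                 server.append(k)
--                 answer += 1
--     return answer
-- ===== SOURCE B (Python) =====
-- def solution(players, m, k):
--     # Sliding-window count of still-alive servers instead of rebuilding the server list each step.
--     answer = 0
--     added = []   # added[i] = number of servers started at step i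
--     window = 0   # servers started in the last k-1 steps (they are the alive ones)
--     for i, player in enumerate(players):
--         if k > 1 and i >= k:
--             window -= added[i - k]
--         available = window * m + m - 1
--         if player > available:
--             add = -((available - player) // m)   # ceil((player - available) / m)
--         else:
--             add = 0
--         added.append(add)
--         answer += add
--         if k > 1:
--             window += add
--     return answer
-- ===== Notes on version B (the rewrite author's own statement) =====
-- stated objective: faster
-- what changed: B keeps a sliding-window counter of still-alive servers (additions list plus one running sum) and computes each batch size by ceiling division, instead of A's per-step rebuild of the whole server list and one-at-a-time while-loop appends.
import Mathlib
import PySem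

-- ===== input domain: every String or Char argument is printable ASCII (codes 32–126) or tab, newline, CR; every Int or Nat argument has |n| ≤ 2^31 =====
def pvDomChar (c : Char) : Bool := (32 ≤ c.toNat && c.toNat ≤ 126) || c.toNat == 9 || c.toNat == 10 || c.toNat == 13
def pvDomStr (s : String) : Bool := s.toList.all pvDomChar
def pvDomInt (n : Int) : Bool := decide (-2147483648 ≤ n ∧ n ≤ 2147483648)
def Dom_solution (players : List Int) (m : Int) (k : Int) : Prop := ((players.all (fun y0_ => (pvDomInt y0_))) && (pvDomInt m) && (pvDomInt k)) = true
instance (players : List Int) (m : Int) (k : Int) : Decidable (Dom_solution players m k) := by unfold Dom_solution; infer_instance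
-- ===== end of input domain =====

-- B replaces A's per-step rebuild of the whole server list by a sliding-window count of
-- still-alive servers (one counter plus the per-step additions list).

-- ===== PORT A =====
-- the Python 'while temp < player' loop; the '0 < m' conjunct only makes the recursion
-- total (with m ≤ 0 and temp < player the Python loop diverges — such inputs are outside Pre_)
-- the appended servers are collected in `acc` (cheap cons) and attached in Python's
-- append order when the loop ends; every appended element is the same literal k
def serverLoop (player m k temp : Int) (server acc : List Int) (answer : Int) : List Int × Int :=
  if h : temp < player ∧ 0 < m then
    serverLoop player m k (temp + m) server (k :: acc) (answer + 1)
  else (server ++ acc.reverse, answer)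
termination_by (player - temp).toNat
decreasing_by omega

def stepA (m k : Int) (st : List Int × Int) (player : Int) : List Int × Int :=
  let server := (st.1.map (fun v => v - 1)).filter (fun v => decide (0 < v))
  let ap := (server.length : Int) * m + m - 1
  if ap < player then serverLoop player m k ap server [] st.2 else (server, st.2)

def solution (players : List Int) (m : Int) (k : Int) : Int :=
  (players.foldl (stepA m k) ([], 0)).2

-- ===== PORT B =====
def stepB (m k : Int) (st : Int × List Int × Int) (pi : Int × Nat) : Int × List Int × Int :=
  let added := st.2.1
  let window := if 1 < k ∧ k ≤ (pi.2 : Int) then st.2.2 - (PySem.List.pyGet? added ((pi.2 : Int) - k)).getD 0 else st.2.2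
  let available := window * m + m - 1
  let add := if available < pi.1 then -(PySem.Int.floordiv (available - pi.1) m) else 0
  (st.1 + add, added ++ [add], if 1 < k then window + add else window)

def solution_alt (players : List Int) (m : Int) (k : Int) : Int :=
  ((players.zipIdx).foldl (stepB m k) (0, [], 0)).1

-- ===== PRECONDITION & SPEC =====
-- Pre_ excludes exactly the inputs on which Python A diverges (the 'while temp < player'
-- loop never terminates): m ≤ 0 together with some player ≥ m; A returns on all other inputs.
def Pre_solution (players : List Int) (m : Int) (k : Int) : Prop :=
  0 < m ∨ ∀ p ∈ players, p < m
instance (players : List Int) (m : Int) (k : Int) : Decidable (Pre_solution players m k) := by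
  unfold Pre_solution; infer_instance

def pvWitness_solution : List Int × Int × Int := ([3, 1, 10, 6], 2, 3)

def Spec_solution (players : List Int) (m : Int) (k : Int) (out : Int) : Prop := out = solution_alt players m k
instance (players : List Int) (m : Int) (k : Int) (out : Int) : Decidable (Spec_solution players m k out) := by unfold Spec_solution; infer_instance

-- ===== CLAIM (what is proved, stated in full; the proofs are below) =====
def Claim_equal_solution : Prop := ∀ (players : List Int) (m : Int) (k : Int), Dom_solution players m k → Pre_solution players m k → Spec_solution players m k (solution players m k)

-- ===== LEMMAS AND PROOFS =====

-- A's server list after the steps recorded in `adds` (adds[j'] = servers started at step j'),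
-- viewed at time t, scanning from index j
def srv (k t : Int) : Int → List Int → List Int
  | _, [] => []
  | j, a :: l => (if j = t ∨ 0 < k - (t - j) then List.replicate a.toNat (k - (t - j)) else []) ++ srv k t (j + 1) l

-- windowed sum: Σ adds[j'] over the j' with t - j' < k
def S (k t : Int) : Int → List Int → Int
  | _, [] => 0
  | j, a :: l => (if t - j < k then a else 0) + S k t (j + 1) l

def decay (s : List Int) : List Int := (s.map (fun v => v - 1)).filter (fun v => decide (0 < v))

theorem S_append (k t c : Int) (l : List Int) : ∀ j : Int,
    S k t j (l ++ [c]) = S k t j l + (if t - (j + l.length) < k then c else 0) := by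
  induction l with
  | nil => intro j; simp [S]
  | cons a l ih =>
      intro j
      simp only [List.cons_append, S, ih (j + 1), List.length_cons]
      have h : (j + 1 + (l.length : Int)) = j + ((l.length : Int) + 1) := by ring
      rw [h]; push_cast; ring

theorem S_zero (k t : Int) (hk : k ≤ 1) (l : List Int) : ∀ j : Int,
    j + l.length ≤ t → S k t j l = 0 := by
  induction l with
  | nil => intro j _; simp [S]
  | cons a l ih =>
      intro j h
      simp only [List.length_cons] at h
      push_cast at h
      have h1 : ¬ (t - j < k) := by omega
      simp [S, h1, ih (j + 1) (by push_cast; omega)]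

theorem S_all_zero (k t : Int) (l : List Int) (hl : ∀ x ∈ l, x = 0) : ∀ j : Int, S k t j l = 0 := by
  induction l with
  | nil => intro j; simp [S]
  | cons a l ih =>
      intro j
      have ha : a = 0 := hl a (by simp)
      simp [S, ha, ih (fun x hx => hl x (by simp [hx]))]

theorem S_diff (k t : Int) (l : List Int) : ∀ j : Int,
    S k (t - 1) j l = S k t j l +
      (if j ≤ t - k ∧ t - k < j + l.length then l.getD (t - k - j).toNat 0 else 0) := by
  induction l with
  | nil => intro j; simp [S]
  | cons a l ih =>
      intro j
      simp only [S, ih (j + 1), List.length_cons]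
      by_cases he : t - k = j
      · have h1 : t - 1 - j < k := by omega
        have h2 : ¬ (t - j < k) := by omega
        have h3 : ¬ (j + 1 ≤ t - k ∧ t - k < j + 1 + (l.length : Int)) := by omega
        have h4 : j ≤ t - k ∧ t - k < j + ((l.length : Int) + 1) := by push_cast; omega
        have h5 : (t - k - j).toNat = 0 := by omega
        push_cast
        simp only [h1, if_pos, h2, if_neg, if_false, h3, h4, if_true, h5, List.getD_cons_zero]
        simp [h1, h2, h3, h4, h5]
        omega
      · have houter : (t - 1 - j < k) ↔ (t - j < k) := by omega
        by_cases hin : j + 1 ≤ t - k ∧ t - k < j + 1 + (l.length : Int)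
        · have h4 : j ≤ t - k ∧ t - k < j + ((l.length : Int) + 1) := by push_cast; omega
          have h5 : (t - k - j).toNat = (t - k - (j + 1)).toNat + 1 := by omega
          push_cast
          rw [if_pos hin, if_pos (by push_cast; omega : j ≤ t - k ∧ t - k < j + ((l.length : Int) + 1)), h5, List.getD_cons_succ]
          by_cases hout : t - j < k
          · rw [if_pos (houter.mpr hout), if_pos hout]; ring
          · rw [if_neg (fun hc => hout (houter.mp hc)), if_neg hout]; ring
        · have h4 : ¬ (j ≤ t - k ∧ t - k < j + ((l.length : Int) + 1)) := by push_cast at hin ⊢; omega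
          push_cast
          rw [if_neg hin, if_neg (by push_cast at h4 ⊢; omega : ¬ (j ≤ t - k ∧ t - k < j + ((l.length : Int) + 1)))]
          by_cases hout : t - j < k
          · rw [if_pos (houter.mpr hout), if_pos hout]; ring
          · rw [if_neg (fun hc => hout (houter.mp hc)), if_neg hout]; ring

theorem decay_append (s₁ s₂ : List Int) : decay (s₁ ++ s₂) = decay s₁ ++ decay s₂ := by
  simp [decay]

theorem decay_replicate (n : Nat) (v : Int) :
    decay (List.replicate n v) = if 0 < v - 1 then List.replicate n (v - 1) else [] := by
  simp only [decay, List.map_replicate, List.filter_replicate]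
  by_cases h : 0 < v - 1 <;> simp [h]

theorem decay_srv (k t : Int) (l : List Int) : ∀ j : Int,
    j + l.length ≤ t + 1 → decay (srv k t j l) = srv k (t + 1) j l := by
  induction l with
  | nil => intro j _; simp [srv, decay]
  | cons a l ih =>
      intro j h
      simp only [List.length_cons] at h
      push_cast at h
      have hj : j ≤ t := by omega
      simp only [srv, decay_append, ih (j + 1) (by push_cast; omega)]
      congr 1
      by_cases hc : j = t ∨ 0 < k - (t - j)
      · rw [if_pos hc, decay_replicate]
        have hv : k - (t - j) - 1 = k - (t + 1 - j) := by ring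
        have hne : ¬ j = t + 1 := by omega
        by_cases hp : 0 < k - (t + 1 - j)
        · rw [if_pos (by omega : (0:Int) < k - (t - j) - 1), hv, if_pos (Or.inr hp)]
        · rw [if_neg (by omega : ¬ (0:Int) < k - (t - j) - 1), if_neg (by push_neg; exact ⟨hne, by omega⟩)]
      · push_neg at hc
        rw [if_neg (by push_neg; exact hc), if_neg (by push_neg; exact ⟨by omega, by omega⟩)]
        simp [decay]

theorem srv_len (k t : Int) (l : List Int) : ∀ j : Int, (∀ x ∈ l, 0 ≤ x) →
    j + l.length ≤ t → ((srv k t j l).length : Int) = S k t j l := by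
  induction l with
  | nil => intro j _ _; simp [srv, S]
  | cons a l ih =>
      intro j hnn h
      simp only [List.length_cons] at h
      push_cast at h
      have hj : ¬ j = t := by omega
      have ha : 0 ≤ a := hnn a (by simp)
      have hrest := ih (j + 1) (fun x hx => hnn x (by simp [hx])) (by push_cast; omega)
      simp only [srv, S, List.length_append]
      by_cases hp : t - j < k
      · rw [if_pos (Or.inr (by omega : (0:Int) < k - (t - j))), if_pos hp, List.length_replicate]
        push_cast [Int.toNat_of_nonneg ha]
        rw [hrest]
      · rw [if_neg (by push_neg; exact ⟨hj, by omega⟩), if_neg hp, List.length_nil]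
        push_cast
        rw [hrest]

theorem srv_append (k t c : Int) (l : List Int) : ∀ j : Int,
    srv k t j (l ++ [c]) = srv k t j l ++ srv k t (j + l.length) [c] := by
  induction l with
  | nil => intro j; simp [srv]
  | cons a l ih =>
      intro j
      simp only [List.cons_append, srv, ih (j + 1), List.length_cons, List.append_assoc]
      have h : j + 1 + (l.length : Int) = j + ((l.length : Int) + 1) := by ring
      push_cast
      rw [h]

theorem srv_single_last (k t c : Int) : srv k t t [c] = List.replicate c.toNat k := by
  simp [srv]

theorem ceil_spec (a b : Int) (hb : 0 < b) :
    (-(PySem.Int.floordiv (-a) b) - 1) * b < a ∧ a ≤ -(PySem.Int.floordiv (-a) b) * b :=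
  (PySem.Int.neg_floordiv_neg_eq_iff_of_pos hb).mp rfl

theorem serverLoop_count (player m k : Int) (hm : 0 < m) :
    ∀ (temp : Int) (server acc : List Int) (ans : Int), temp < player →
    serverLoop player m k temp server acc ans
      = (server ++ acc.reverse ++ List.replicate (-(PySem.Int.floordiv (temp - player) m)).toNat k,
         ans + -(PySem.Int.floordiv (temp - player) m)) := by
  suffices H : ∀ (N : Nat) (temp : Int) (server acc : List Int) (ans : Int),
      (player - temp).toNat ≤ N → temp < player →
      serverLoop player m k temp server acc ans
        = (server ++ acc.reverse ++ List.replicate (-(PySem.Int.floordiv (temp - player) m)).toNat k,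
           ans + -(PySem.Int.floordiv (temp - player) m)) by
    intro temp server acc ans h; exact H (player - temp).toNat temp server acc ans le_rfl h
  intro N
  induction N with
  | zero => intro temp server acc ans hN h; omega
  | succ N ih =>
      intro temp server acc ans hN h
      rw [serverLoop, dif_pos ⟨h, hm⟩]
      have hrw : temp - player = -(player - temp) := by ring
      obtain ⟨hc1, hc2⟩ := ceil_spec (player - temp) m hm
      rw [← hrw] at hc1 hc2
      set c := -(PySem.Int.floordiv (temp - player) m) with hc_def
      by_cases h2 : temp + m < player
      · rw [ih (temp + m) server (k :: acc) (ans + 1) (by omega) h2]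
        have hrw2 : temp + m - player = -(player - (temp + m)) := by ring
        obtain ⟨hd1, hd2⟩ := ceil_spec (player - (temp + m)) m hm
        rw [← hrw2] at hd1 hd2
        set c' := -(PySem.Int.floordiv (temp + m - player) m) with hc'_def
        have hcc : c = c' + 1 := by
          rw [hc_def, hrw]
          rw [PySem.Int.neg_floordiv_neg_eq_iff_of_pos hm]
          constructor
          · nlinarith
          · nlinarith
        have hc'pos : 0 < c' := by nlinarith
        have hct : c.toNat = c'.toNat + 1 := by omega
        rw [hct, hcc, List.replicate_succ]
        refine Prod.ext ?_ ?_
        · simp [List.append_assoc]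
        · simp; ring
      · rw [serverLoop, dif_neg (fun hcon => h2 hcon.1)]
        have hc1' : c = 1 := by
          rw [hc_def, hrw, PySem.Int.neg_floordiv_neg_eq_iff_of_pos hm]
          constructor
          · nlinarith
          · nlinarith
        rw [hc1']
        simp [List.replicate_succ]

theorem main_inv (m k : Int) (players : List Int) : ∀ (adds : List Int),
    (0 < m ∨ ((∀ p ∈ players, p < m) ∧ ∀ x ∈ adds, x = 0)) →
    (∀ x ∈ adds, 0 ≤ x) →
    (players.foldl (stepA m k) (srv k ((adds.length : Int) - 1) 0 adds, adds.sum)).2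
      = ((players.zipIdx adds.length).foldl (stepB m k)
          (adds.sum, adds, if 1 < k then S k ((adds.length : Int) - 1) 0 adds else 0)).1 := by
  induction players with
  | nil => intro adds _ _; simp
  | cons p rest ih =>
      intro adds hdisj hnn
      have hdec : ((srv k ((adds.length : Int) - 1) 0 adds).map (fun v => v - 1)).filter (fun v => decide (0 < v))
          = srv k (adds.length : Int) 0 adds := by
        have h := decay_srv k ((adds.length : Int) - 1) adds 0 (by omega)
        rw [decay] at h
        rw [h, sub_add_cancel]
      have hlen : ((srv k (adds.length : Int) 0 adds).length : Int) = S k (adds.length : Int) 0 adds :=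
        srv_len k (adds.length : Int) adds 0 hnn (by omega)
      have hwin : (if 1 < k ∧ k ≤ (adds.length : Int)
              then (if 1 < k then S k ((adds.length : Int) - 1) 0 adds else 0)
                   - (PySem.List.pyGet? adds ((adds.length : Int) - k)).getD 0
              else (if 1 < k then S k ((adds.length : Int) - 1) 0 adds else 0))
          = S k (adds.length : Int) 0 adds := by
        by_cases hk1 : 1 < k
        · rw [if_pos hk1]
          have hdiffS := S_diff k (adds.length : Int) adds 0
          by_cases hk2 : k ≤ (adds.length : Int)
          · have hcond : (0:Int) ≤ (adds.length : Int) - k ∧ (adds.length : Int) - k < 0 + (adds.length : Int) := by omega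
            rw [if_pos hcond] at hdiffS
            have hget : (PySem.List.pyGet? adds ((adds.length : Int) - k)).getD 0
                = adds.getD ((adds.length : Int) - k - 0).toNat 0 := by
              rw [PySem.List.pyGet?_of_nonneg adds (by omega : (0:Int) ≤ (adds.length : Int) - k),
                List.getD_eq_getElem?_getD]
              norm_num
            rw [if_pos ⟨hk1, hk2⟩, hget]
            linarith [hdiffS]
          · have hcond : ¬ ((0:Int) ≤ (adds.length : Int) - k ∧ (adds.length : Int) - k < 0 + (adds.length : Int)) := by omega
            rw [if_neg hcond, add_zero] at hdiffS
            rw [if_neg (fun hc => hk2 hc.2), hdiffS]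
        · rw [if_neg hk1, if_neg (fun hc => hk1 hc.1)]
          exact (S_zero k (adds.length : Int) (by omega) adds 0 (by omega)).symm
      have hsrv_app : ∀ c : Int, srv k (adds.length : Int) 0 (adds ++ [c])
          = srv k (adds.length : Int) 0 adds ++ List.replicate c.toNat k := by
        intro c
        rw [srv_append]
        congr 1
        rw [zero_add, srv_single_last]
      have hS_app : ∀ c : Int, S k (adds.length : Int) 0 (adds ++ [c])
          = S k (adds.length : Int) 0 adds + (if 0 < k then c else 0) := by
        intro c
        rw [S_append]
        by_cases h0 : (0:Int) < k
        · rw [if_pos (by omega : (adds.length : Int) - (0 + (adds.length : Int)) < k), if_pos h0]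
        · rw [if_neg (by omega : ¬ ((adds.length : Int) - (0 + (adds.length : Int)) < k)), if_neg h0]
      have hlen' : ∀ c : Int, (((adds ++ [c]).length : Int) - 1) = (adds.length : Int) := by
        intro c; simp
      simp only [List.foldl_cons, List.zipIdx_cons, stepA, stepB]
      rw [hdec, hlen, hwin]
      by_cases htr : S k (adds.length : Int) 0 adds * m + m - 1 < p
      · -- trigger: A runs the while loop, B adds the ceiling
        have hm : 0 < m := by
          rcases hdisj with h | ⟨hp, hz⟩
          · exact h
          · exfalso
            have hSA : S k (adds.length : Int) 0 adds = 0 := S_all_zero k (adds.length : Int) adds hz 0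
            have hpm : p < m := hp p (by simp)
            rw [hSA] at htr
            omega
        set ap := S k (adds.length : Int) 0 adds * m + m - 1 with hap
        set c := -(PySem.Int.floordiv (ap - p) m) with hc
        have hcpos : 0 < c := by
          obtain ⟨h1, h2⟩ := ceil_spec (p - ap) m hm
          have hrw : -(p - ap) = ap - p := by ring
          rw [hrw] at h1 h2
          nlinarith
        rw [if_pos htr, if_pos htr,
            serverLoop_count p m k hm ap (srv k (adds.length : Int) 0 adds) [] adds.sum htr]
        simp only [List.reverse_nil, List.append_nil]
        have h1 := ih (adds ++ [c])
          (Or.inl hm)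
          (by intro x hx
              rcases List.mem_append.mp hx with h | h
              · exact hnn x h
              · simp at h; omega)
        rw [hlen', hsrv_app, List.sum_append, List.length_append] at h1
        simp only [List.sum_cons, List.sum_nil, add_zero, List.length_singleton] at h1
        have hstored : (if 1 < k then S k (adds.length : Int) 0 (adds ++ [c]) else 0)
            = (if 1 < k then S k (adds.length : Int) 0 adds + c else S k (adds.length : Int) 0 adds) := by
          by_cases hk1 : 1 < k
          · rw [if_pos hk1, if_pos hk1, hS_app, if_pos (by omega : (0:Int) < k)]
          · rw [if_neg hk1, if_neg hk1]
            exact (S_zero k (adds.length : Int) (by omega) adds 0 (by omega)).symm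
        rw [hstored] at h1
        exact h1
      · -- no trigger: A just decays, B records a zero
        rw [if_neg htr, if_neg htr]
        have h1 := ih (adds ++ [0])
          (by rcases hdisj with h | ⟨hp, hz⟩
              · exact Or.inl h
              · refine Or.inr ⟨fun q hq => hp q (by simp [hq]), ?_⟩
                intro x hx
                rcases List.mem_append.mp hx with h | h
                · exact hz x h
                · simpa using h)
          (by intro x hx
              rcases List.mem_append.mp hx with h | h
              · exact hnn x h
              · simp at h; omega)
        rw [hlen', hsrv_app, List.sum_append, List.length_append] at h1
        simp only [List.sum_cons, List.sum_nil, add_zero, List.length_singleton,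
          Int.toNat_zero, List.replicate_zero, List.append_nil] at h1
        have hstored : (if 1 < k then S k (adds.length : Int) 0 (adds ++ [0]) else 0)
            = (if 1 < k then S k (adds.length : Int) 0 adds + 0 else S k (adds.length : Int) 0 adds) := by
          by_cases hk1 : 1 < k
          · rw [if_pos hk1, if_pos hk1, hS_app]
            by_cases h0k : (0:Int) < k
            · rw [if_pos h0k]
            · rw [if_neg h0k]
          · rw [if_neg hk1, if_neg hk1]
            exact (S_zero k (adds.length : Int) (by omega) adds 0 (by omega)).symm
        rw [hstored, add_zero] at h1
        simp only [add_zero]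
        exact h1

-- ===== VERDICT (by name: the statement is the Claim_ definition above) =====
theorem solution_spec : Claim_equal_solution := by
  unfold Claim_equal_solution
  intro players m k _ hpre
  unfold Spec_solution solution solution_alt
  have hstart := main_inv m k players []
    (by rcases hpre with h | h
        · exact Or.inl h
        · exact Or.inr ⟨h, by simp⟩)
    (by simp)
  simpa [srv, S] using hstart
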